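-- pv_equiv track=rewrite | github.com/sj1225/algorithm-study | 프로그래머스/0/181829. 이차원 배열 대각선 순회하기/이차원 배열 대각선 순회하기.py | solution
-- ===== SOURCE A (Python) =====
-- def solution(board, k):
--     answer = 0
--
--     a = len(board)
--     b = len(board[0])
--
--     for i in range(0, a):
--         for j in range(0, b):
--             if i + j <= k:
--                 answer = answer + board[i][j]
--
--     return answer
-- ===== SOURCE B (Python) =====
-- def solution(board, k):
--     a = len(board)
--     b = len(board[0])
--     total = 0
--     for s in range(min(k, a + b - 2) + 1):
--         for i in range(max(0, s - (b - 1)), min(a - 1, s) + 1):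
--             total += board[i][s - i]
--     return total
-- ===== Notes on version B (the rewrite author's own statement) =====
-- stated objective: alternative
-- what changed: Traverses the board by anti-diagonals: s runs from 0 to min(k, a+b-2) and for each diagonal i runs over max(0, s-(b-1))..min(a-1, s) with j = s-i, so the constraint i+j<=k is encoded in the loop bounds and the per-cell test disappears; A instead scans every cell row by row and tests i+j<=k each time.
import Mathlib
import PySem

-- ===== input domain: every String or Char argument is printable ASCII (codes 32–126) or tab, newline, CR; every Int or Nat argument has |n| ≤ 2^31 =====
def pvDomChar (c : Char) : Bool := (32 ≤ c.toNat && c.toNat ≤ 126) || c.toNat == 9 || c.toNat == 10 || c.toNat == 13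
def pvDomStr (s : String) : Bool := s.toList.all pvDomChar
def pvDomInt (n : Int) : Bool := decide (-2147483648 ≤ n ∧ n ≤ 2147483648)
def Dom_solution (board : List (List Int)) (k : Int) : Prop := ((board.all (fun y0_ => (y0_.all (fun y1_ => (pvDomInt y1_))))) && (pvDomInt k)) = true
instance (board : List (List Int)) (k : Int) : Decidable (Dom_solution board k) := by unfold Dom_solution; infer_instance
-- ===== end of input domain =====

-- B visits the board by anti-diagonals s = i+j, with the constraint i+j <= k encoded in the
-- loop bounds instead of a per-cell test (objective: alternative). Return values only.

-- ===== PORT A =====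
def solution (board : List (List Int)) (k : Int) : Int :=
  let a : Int := board.length
  let b : Int := (PySem.List.pyGetD board 0 []).length   -- board[0]: raises on board = [], excluded by Pre_
  (PySem.List.pyRange 0 a).foldl (fun answer i =>
    (PySem.List.pyRange 0 b).foldl (fun answer j =>
      if i + j ≤ k then
        -- board[i][j]: the inner access can raise on ragged boards, excluded by Pre_
        answer + PySem.List.pyGetD (PySem.List.pyGetD board i []) j 0
      else answer) answer) 0

-- ===== PORT B =====
def solution_alt (board : List (List Int)) (k : Int) : Int :=
  let a : Int := board.length
  let b : Int := (PySem.List.pyGetD board 0 []).length   -- board[0]: raises on board = [], excluded by Pre_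
  (PySem.List.pyRange 0 (min k (a + b - 2) + 1)).foldl (fun total s =>
    (PySem.List.pyRange (max 0 (s - (b - 1))) (min (a - 1) s + 1)).foldl (fun total i =>
      total + PySem.List.pyGetD (PySem.List.pyGetD board i []) (s - i) 0) total) 0

-- ===== PRECONDITION & SPEC =====
-- Pre_ excludes exactly the inputs where Python A raises IndexError: the empty board
-- (board[0]) and ragged boards on which some accessed cell board[i][j] is missing.
def Pre_solution (board : List (List Int)) (k : Int) : Prop :=
  board ≠ [] ∧ ∀ i < board.length, ∀ j < (board.getD 0 []).length,
    (i : Int) + (j : Int) ≤ k → j < (board.getD i []).length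
instance (board : List (List Int)) (k : Int) : Decidable (Pre_solution board k) := by
  unfold Pre_solution; infer_instance
def pvWitness_solution : List (List Int) × Int := ([[1, 2], [3, 4]], 1)

def Spec_solution (board : List (List Int)) (k : Int) (out : Int) : Prop := out = solution_alt board k
instance (board : List (List Int)) (k : Int) (out : Int) : Decidable (Spec_solution board k out) := by unfold Spec_solution; infer_instance

-- ===== CLAIM (what is proved, stated in full; the proofs are below) =====
def Claim_equal_solution : Prop := ∀ (board : List (List Int)) (k : Int), Dom_solution board k → Pre_solution board k → Spec_solution board k (solution board k)

-- ===== LEMMAS AND PROOFS =====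

lemma sum_map_range (f : ℕ → Int) (n : ℕ) :
    ((List.range n).map f).sum = ∑ i ∈ Finset.range n, f i := by
  induction n with
  | zero => simp
  | succ n ih => simp [List.range_succ, Finset.sum_range_succ, ih]

-- the reindexing core: anti-diagonal double sum = row-by-row filtered double sum
lemma core (f : ℕ → ℕ → Int) (a b : ℕ) (k : Int) (ha : 1 ≤ a) (hb : 1 ≤ b) :
    ∑ s ∈ Finset.range ((min k ((a : Int) + (b : Int) - 2) + 1).toNat),
      ∑ i ∈ Finset.Ico (s - (b - 1)) (min (a - 1) s + 1), f i (s - i)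
    = ∑ i ∈ Finset.range a, ∑ j ∈ Finset.range b,
        if (i : Int) + (j : Int) ≤ k then f i j else 0 := by
  rw [← Finset.sum_sigma (Finset.range ((min k ((a : Int) + (b : Int) - 2) + 1).toNat))
    (fun s => Finset.Ico (s - (b - 1)) (min (a - 1) s + 1))
    (fun x => f x.2 (x.1 - x.2))]
  have hR : (∑ i ∈ Finset.range a, ∑ j ∈ Finset.range b,
      if (i : Int) + (j : Int) ≤ k then f i j else 0)
      = ∑ p ∈ (Finset.range a ×ˢ Finset.range b).filter
          (fun p => (p.1 : Int) + (p.2 : Int) ≤ k), f p.1 p.2 := by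
    rw [Finset.sum_filter, ← Finset.sum_product']
  rw [hR]
  apply Finset.sum_nbij' (i := fun x => (x.2, x.1 - x.2))
    (j := fun p => ⟨p.1 + p.2, p.1⟩)
  · rintro ⟨s, i⟩ hm
    simp only [Finset.mem_sigma, Finset.mem_range, Finset.mem_Ico] at hm
    simp only [Finset.mem_filter, Finset.mem_product, Finset.mem_range]
    obtain ⟨hs, hi1, hi2⟩ := hm
    refine ⟨⟨by omega, by omega⟩, by omega⟩
  · rintro ⟨i, j⟩ hm
    simp only [Finset.mem_filter, Finset.mem_product, Finset.mem_range] at hm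
    simp only [Finset.mem_sigma, Finset.mem_range, Finset.mem_Ico]
    obtain ⟨⟨hi, hj⟩, hk⟩ := hm
    refine ⟨by omega, by omega, by omega⟩
  · rintro ⟨s, i⟩ hm
    simp only [Finset.mem_sigma, Finset.mem_range, Finset.mem_Ico] at hm
    obtain ⟨hs, hi1, hi2⟩ := hm
    simp only [Sigma.mk.injEq]
    constructor
    · omega
    · exact heq_of_eq rfl
  · rintro ⟨i, j⟩ hm
    simp only [Finset.mem_filter, Finset.mem_product, Finset.mem_range] at hm
    simp only [Prod.mk.injEq]
    exact ⟨trivial, by omega⟩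
  · rintro ⟨s, i⟩ _
    rfl

lemma foldl_id {α β : Type} (l : List α) (init : β) : l.foldl (fun x _ => x) init = init := by
  induction l generalizing init with
  | nil => rfl
  | cons x xs ih => exact ih init

-- a pyRange sum of diagonal cell reads, as a Finset.Ico sum over ℕ
lemma pyRange_sum_Ico (board : List (List Int)) (s m n : ℕ) (hms : ∀ i, i < n → i ≤ s) :
    ((PySem.List.pyRange (m : Int) (n : Int)).map
      (fun i => PySem.List.pyGetD (PySem.List.pyGetD board i []) ((s : Int) - i) 0)).sum
    = ∑ i ∈ Finset.Ico m n, (board.getD i []).getD (s - i) 0 := by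
  rw [PySem.List.pyRange_one]
  have h1 : ((n : Int) - (m : Int)).toNat = n - m := by omega
  rw [h1, List.map_map, sum_map_range, Finset.sum_Ico_eq_sum_range]
  apply Finset.sum_congr rfl
  intro t ht
  rw [Finset.mem_range] at ht
  have h2 : (m : Int) + (t : Int) = ((m + t : ℕ) : Int) := by push_cast; ring
  have h3 : (s : Int) - ((m + t : ℕ) : Int) = ((s - (m + t) : ℕ) : Int) := by
    have := hms (m + t) (by omega)
    omega
  simp only [Function.comp_apply, h2, h3, PySem.List.pyGetD_natCast]

-- ===== VERDICT (by name: the statement is the Claim_ definition above) =====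
theorem solution_spec : Claim_equal_solution := by
  intro board k _ hpre
  obtain ⟨hne, _⟩ := hpre
  unfold Spec_solution solution solution_alt
  simp only []
  rw [PySem.List.pyGetD_ofNat' board 0 []]
  set bN : Nat := (board.getD 0 []).length with hbN
  set aN : Nat := board.length with haN
  have haN1 : 1 ≤ aN := by
    cases board with
    | nil => exact absurd rfl hne
    | cons x xs => simp [haN]
  -- ---- A side: fold → nested list-of-range sums ----
  rw [show ((aN : Int)) = ((aN : Nat) : Int) from rfl, PySem.List.pyRange_zero_natCast aN,
    show ((bN : Int)) = ((bN : Nat) : Int) from rfl, PySem.List.pyRange_zero_natCast bN]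
  rw [List.foldl_map]
  have hinner : ∀ (i : Nat) (ans : Int),
      (List.foldl (fun answer j => if (i : Int) + j ≤ k then
          answer + PySem.List.pyGetD (PySem.List.pyGetD board (i : Int) []) j 0 else answer)
        ans ((List.range bN).map (fun j : Nat => (j : Int))))
      = ans + ((List.range bN).map (fun j : Nat =>
          if (i : Int) + (j : Int) ≤ k then (board.getD i []).getD j 0 else 0)).sum := by
    intro i ans
    rw [List.foldl_map]
    have : (fun (answer : Int) (j : Nat) => if (i : Int) + (j : Int) ≤ k then
        answer + PySem.List.pyGetD (PySem.List.pyGetD board (i : Int) []) (j : Int) 0 else answer)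
        = (fun (answer : Int) (j : Nat) => answer + (if (i : Int) + (j : Int) ≤ k then
            (board.getD i []).getD j 0 else 0)) := by
      funext ans j
      rw [PySem.List.pyGetD_natCast board i [], PySem.List.pyGetD_natCast (board.getD i []) j 0]
      split <;> simp
    rw [this, PySem.List.foldl_add]
  have houter : (fun (answer : Int) (i : Nat) =>
      List.foldl (fun answer j => if (i : Int) + j ≤ k then
          answer + PySem.List.pyGetD (PySem.List.pyGetD board (i : Int) []) j 0 else answer)
        answer ((List.range bN).map (fun j : Nat => (j : Int))))
      = (fun (answer : Int) (i : Nat) => answer + ((List.range bN).map (fun j : Nat =>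
          if (i : Int) + (j : Int) ≤ k then (board.getD i []).getD j 0 else 0)).sum) := by
    funext ans i; exact hinner i ans
  rw [houter, PySem.List.foldl_add]
  simp only [zero_add]
  -- ---- case split on empty rows ----
  by_cases hb0 : bN = 0
  · -- every row is empty: both programs sum nothing
    -- A side: inner range bN is empty, every summand is 0
    -- B side: the inner pyRange is always empty since min (aN-1) s + 1 ≤ max 0 (s - (bN-1))
    have hBin : ∀ s : Int, PySem.List.pyRange (max 0 (s - ((bN : Int) - 1))) (min ((aN : Int) - 1) s + 1) = [] := by
      intro s
      apply PySem.List.pyRange_one_eq_nil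
      rw [hb0]
      push_cast
      omega
    have hBody : (fun (total : Int) (s : Int) =>
        (PySem.List.pyRange (max 0 (s - ((bN : Int) - 1))) (min ((aN : Int) - 1) s + 1)).foldl
          (fun total i => total + PySem.List.pyGetD (PySem.List.pyGetD board i []) (s - i) 0) total)
        = (fun (total : Int) (_ : Int) => total) := by
      funext total s; rw [hBin s]; rfl
    rw [hBody, foldl_id]
    simp [hb0]
  · -- bN ≥ 1: reindex via the anti-diagonal bijection
    have hbN1 : 1 ≤ bN := Nat.one_le_iff_ne_zero.mpr hb0
    -- B side: fold → sum over s of Ico sums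
    rw [PySem.List.pyRange_one]
    have hN : ((min k ((aN : Int) + (bN : Int) - 2) + 1) - 0).toNat
        = (min k ((aN : Int) + (bN : Int) - 2) + 1).toNat := by omega
    rw [hN, List.foldl_map]
    have hBbody : (fun (total : Int) (s : Nat) =>
        (PySem.List.pyRange (max 0 ((0 : Int) + (s : Int) - ((bN : Int) - 1))) (min ((aN : Int) - 1) ((0 : Int) + (s : Int)) + 1)).foldl
          (fun total i => total + PySem.List.pyGetD (PySem.List.pyGetD board i []) ((0 : Int) + (s : Int) - i) 0) total)
        = (fun (total : Int) (s : Nat) => total +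
            ∑ i ∈ Finset.Ico (s - (bN - 1)) (min (aN - 1) s + 1), (board.getD i []).getD (s - i) 0) := by
      funext total s
      have hlo : max 0 ((0 : Int) + (s : Int) - ((bN : Int) - 1)) = ((s - (bN - 1) : ℕ) : Int) := by omega
      have hhi : min ((aN : Int) - 1) ((0 : Int) + (s : Int)) + 1 = ((min (aN - 1) s + 1 : ℕ) : Int) := by omega
      have hzs : (0 : Int) + (s : Int) = ((s : ℕ) : Int) := by ring
      rw [hlo, hhi, hzs, PySem.List.foldl_add,
        pyRange_sum_Ico board s (s - (bN - 1)) (min (aN - 1) s + 1) (fun i hi => by omega)]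
    rw [hBbody, PySem.List.foldl_add]
    simp only [zero_add]
    -- both sides as Finset sums, finish with `core`
    rw [sum_map_range, sum_map_range]
    have : ∀ i : Nat, ((List.range bN).map (fun j : Nat =>
        if (i : Int) + (j : Int) ≤ k then (board.getD i []).getD j 0 else 0)).sum
        = ∑ j ∈ Finset.range bN, (if (i : Int) + (j : Int) ≤ k then (board.getD i []).getD j 0 else 0) := by
      intro i; rw [sum_map_range]
    simp only [this]
    exact (core (fun i j => (board.getD i []).getD j 0) aN bN k haN1 hbN1).symm
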